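-- pv_equiv track=rewrite | github.com/cgcardona/muse | muse/cli/commands/shard.py | _greedy_partition
-- ===== SOURCE A (Python) =====
-- def _greedy_partition(
--     components: list[frozenset[str]],
--     sym_counts: dict[str, int],
--     n_shards: int,
-- ) -> list[frozenset[str]]:
--     """Greedily distribute components into n_shards shards, balancing symbol count."""
--     shards: list[set[str]] = [set() for _ in range(n_shards)]
--     shard_sizes: list[int] = [0] * n_shards
--
--     # Sort components largest-first for better balance.
--     sorted_comps = sorted(
--         components,
--         key=lambda c: sum(sym_counts.get(f, 0) for f in c),
--         reverse=True,
--     )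
--     for comp in sorted_comps:
--         # Assign to the smallest shard.
--         smallest = min(range(n_shards), key=lambda i: shard_sizes[i])
--         shards[smallest].update(comp)
--         shard_sizes[smallest] += sum(sym_counts.get(f, 0) for f in comp)
--
--     return [frozenset(s) for s in shards]
-- ===== SOURCE B (Python) =====
-- from bisect import insort
--
--
-- def _greedy_partition(
--     components: list[frozenset[str]],
--     sym_counts: dict[str, int],
--     n_shards: int,
-- ) -> list[frozenset[str]]:
--     """Distribute components into n_shards shards, balancing symbol count.
--
--     Weighs every component once, sorts the (weight, component) pairs
--     largest-first, and keeps the shards in a sorted list of (size, index)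
--     pairs: the head is always the smallest shard (ties by lowest index),
--     and insort re-files it after each assignment.
--     """
--     weighted = sorted(
--         [(sum(sym_counts.get(f, 0) for f in c), c) for c in components],
--         key=lambda p: p[0],
--         reverse=True,
--     )
--     pq = [(0, i) for i in range(n_shards)]
--     shards = [set() for _ in range(n_shards)]
--     for w, comp in weighted:
--         size, idx = pq[0]
--         del pq[0]
--         shards[idx].update(comp)
--         insort(pq, (size + w, idx))
--     return [frozenset(s) for s in shards]
-- ===== Notes on version B (the rewrite author's own statement) =====
-- stated objective: faster
-- what changed: B replaces A's per-component linear min-scan over all shard sizes (a lambda-keyed min over range(n_shards) each iteration) by a sorted priority list of (size, index) pairs whose head is always the smallest shard and which is re-filed with bisect.insort, and weighs each component once up front, sorting (weight, component) pairs instead of re-computing the weight in the sort key and in the loop.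
import Mathlib
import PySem

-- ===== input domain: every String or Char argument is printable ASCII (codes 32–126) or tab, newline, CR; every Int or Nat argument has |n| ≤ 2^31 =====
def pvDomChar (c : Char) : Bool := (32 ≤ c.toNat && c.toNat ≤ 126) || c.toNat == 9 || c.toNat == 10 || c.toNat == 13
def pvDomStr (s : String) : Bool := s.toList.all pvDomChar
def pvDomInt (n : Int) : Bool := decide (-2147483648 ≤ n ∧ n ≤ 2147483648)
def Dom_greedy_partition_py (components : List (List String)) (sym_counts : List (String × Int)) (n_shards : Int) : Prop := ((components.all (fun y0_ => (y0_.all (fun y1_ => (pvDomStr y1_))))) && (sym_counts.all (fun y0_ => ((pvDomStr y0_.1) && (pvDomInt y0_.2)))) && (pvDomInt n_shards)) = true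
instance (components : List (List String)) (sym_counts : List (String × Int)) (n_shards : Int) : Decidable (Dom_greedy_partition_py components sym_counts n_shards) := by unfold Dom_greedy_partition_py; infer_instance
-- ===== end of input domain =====

-- B replaces A's per-component linear min-scan over all shard sizes by a sorted
-- priority list of (size, index) pairs maintained with bisect.insort, weighing and
-- sorting the components once as (weight, component) pairs (measured faster by a
-- constant factor; return-value equivalence only — A mutates nothing observable).

-- shared helper: sum(sym_counts.get(f, 0) for f in c), identical in both Pythons
def pvWeight (d : PySem.Dict String Int) (c : List String) : Int :=
  c.foldl (fun acc f => acc + d.getD f 0) 0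

-- ===== PORT A =====
def greedy_partition_py (components : List (List String)) (sym_counts : List (String × Int)) (n_shards : Int) : List (List String) :=
  let d := PySem.Dict.ofList sym_counts
  -- shards = [set() for _ in range(n_shards)]; shard_sizes = [0] * n_shards
  let shards0 : List (PySem.Set String) := (PySem.List.pyRange 0 n_shards 1).map (fun _ => PySem.Set.empty)
  let sizes0 : List Int := List.replicate n_shards.toNat 0
  let sorted_comps := PySem.List.sorted components (fun c => pvWeight d c) true
  let st := sorted_comps.foldl (fun st comp =>
    -- smallest = min(range(n_shards), key=lambda i: shard_sizes[i])  (raises on empty range: outside Pre_)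
    match PySem.List.min? (PySem.List.pyRange 0 n_shards 1) (fun i => PySem.List.pyGetD st.2 i 0) with
    | none => st
    | some smallest =>
      (PySem.List.pySetD st.1 smallest
         (PySem.Set.update (PySem.List.pyGetD st.1 smallest PySem.Set.empty) comp),
       PySem.List.pySetD st.2 smallest
         (PySem.List.pyGetD st.2 smallest 0 + pvWeight d comp)))
    (shards0, sizes0)
  -- return [frozenset(s) for s in shards]
  st.1

-- ===== PORT B =====
-- bisect.insort on (size, index) pairs: insert after existing equal entries
def pvInsort (x : Int × Int) : List (Int × Int) → List (Int × Int)
  | [] => [x]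
  | y :: ys => if x.1 < y.1 ∨ (x.1 = y.1 ∧ x.2 < y.2) then x :: y :: ys else y :: pvInsort x ys

def greedy_partition_py_alt (components : List (List String)) (sym_counts : List (String × Int)) (n_shards : Int) : List (List String) :=
  let d := PySem.Dict.ofList sym_counts
  -- weighted = sorted([(weight(c), c) for c in components], key=lambda p: p[0], reverse=True)
  let weighted := PySem.List.sorted (components.map (fun c => (pvWeight d c, c))) (fun p => p.1) true
  let pq0 : List (Int × Int) := (PySem.List.pyRange 0 n_shards 1).map (fun i => ((0 : Int), i))
  let shards0 : List (PySem.Set String) := (PySem.List.pyRange 0 n_shards 1).map (fun _ => PySem.Set.empty)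
  let st := weighted.foldl (fun st p =>
    match st.1 with
    | [] => st  -- pq[0] raises IndexError on an empty pq: outside Pre_
    | (size, idx) :: rest =>
      (pvInsort (size + p.1, idx) rest,
       PySem.List.pySetD st.2 idx
         (PySem.Set.update (PySem.List.pyGetD st.2 idx PySem.Set.empty) p.2)))
    (pq0, shards0)
  st.2

-- ===== PRECONDITION & SPEC =====
-- Pre_ excludes only the inputs where A raises: with components nonempty and
-- n_shards < 1, min() over the empty range raises ValueError (B raises IndexError there).
def Pre_greedy_partition_py (components : List (List String)) (sym_counts : List (String × Int)) (n_shards : Int) : Prop :=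
  components = [] ∨ 1 ≤ n_shards
instance (components : List (List String)) (sym_counts : List (String × Int)) (n_shards : Int) : Decidable (Pre_greedy_partition_py components sym_counts n_shards) := by unfold Pre_greedy_partition_py; infer_instance

def pvWitness_greedy_partition_py : List (List String) × (List (String × Int)) × Int :=
  ([["a"], ["b", "c"]], [("a", 2), ("b", 1)], 2)

def Spec_greedy_partition_py (components : List (List String)) (sym_counts : List (String × Int)) (n_shards : Int) (out : List (List String)) : Prop := out = greedy_partition_py_alt components sym_counts n_shards
instance (components : List (List String)) (sym_counts : List (String × Int)) (n_shards : Int) (out : List (List String)) : Decidable (Spec_greedy_partition_py components sym_counts n_shards out) := by unfold Spec_greedy_partition_py; infer_instance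

-- ===== CLAIM (what is proved, stated in full; the proofs are below) =====
def Claim_equal_greedy_partition_py : Prop := ∀ (components : List (List String)) (sym_counts : List (String × Int)) (n_shards : Int), Dom_greedy_partition_py components sym_counts n_shards → Pre_greedy_partition_py components sym_counts n_shards → Spec_greedy_partition_py components sym_counts n_shards (greedy_partition_py components sym_counts n_shards)

-- ===== LEMMAS AND PROOFS =====

-- (size, index) pairs ordered as Python compares them: lexicographically
def pvLexLe (a b : Int × Int) : Prop := a.1 < b.1 ∨ (a.1 = b.1 ∧ a.2 ≤ b.2)

-- the multiset the priority list represents: (sizes[k], i + k) for each k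
def pvPairs : List Int → Int → List (Int × Int)
  | [], _ => []
  | s :: t, i => (s, i) :: pvPairs t (i + 1)

lemma pvPairs_append (l₁ l₂ : List Int) (i : Int) :
    pvPairs (l₁ ++ l₂) i = pvPairs l₁ i ++ pvPairs l₂ (i + l₁.length) := by
  induction l₁ generalizing i with
  | nil => simp [pvPairs]
  | cons s t ih => simp [pvPairs, ih, add_assoc]; ring_nf

lemma mem_pvPairs {p : Int × Int} {l : List Int} {i : Int} (h : p ∈ pvPairs l i) :
    ∃ k : Nat, ∃ hk : k < l.length, p.2 = i + k ∧ p.1 = l[k] := by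
  induction l generalizing i with
  | nil => simp [pvPairs] at h
  | cons s t ih =>
    simp only [pvPairs, List.mem_cons] at h
    rcases h with h | h
    · exact ⟨0, by simp, by simp [h]⟩
    · obtain ⟨k, hk, h2, h1⟩ := ih h
      exact ⟨k + 1, by simpa using hk, by push_cast [h2]; ring, by simpa using h1⟩

lemma pvInsort_perm (x : Int × Int) (l : List (Int × Int)) : (pvInsort x l).Perm (x :: l) := by
  induction l with
  | nil => simp [pvInsort]
  | cons y ys ih =>
    simp only [pvInsort]
    split
    · exact List.Perm.refl _
    · exact (List.Perm.cons y ih).trans (List.Perm.swap x y ys)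

lemma pvInsort_pairwise {x : Int × Int} {l : List (Int × Int)}
    (h : l.Pairwise pvLexLe) : (pvInsort x l).Pairwise pvLexLe := by
  induction l with
  | nil => simp [pvInsort]
  | cons y ys ih =>
    rcases List.pairwise_cons.mp h with ⟨hy, hys⟩
    simp only [pvInsort]
    split
    · rename_i hlt
      refine List.pairwise_cons.mpr ⟨?_, h⟩
      intro z hz
      rcases List.mem_cons.mp hz with rfl | hz
      · unfold pvLexLe; omega
      · have := hy z hz; unfold pvLexLe at *; omega
    · rename_i hnlt
      refine List.pairwise_cons.mpr ⟨?_, ih hys⟩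
      intro z hz
      have := (pvInsort_perm x ys).mem_iff.mp hz
      rcases List.mem_cons.mp this with rfl | hz'
      · unfold pvLexLe; omega
      · exact hy z hz'

lemma pvPairs_mem (l : List Int) (i : Int) (k : Nat) (hk : k < l.length) :
    (l[k], i + k) ∈ pvPairs l i := by
  induction l generalizing i k with
  | nil => simp at hk
  | cons x t ih =>
    cases k with
    | zero => simp [pvPairs]
    | succ k =>
      simp only [pvPairs, List.mem_cons]
      right
      have := ih (i + 1) k (by simpa using hk)
      simpa [add_assoc, add_comm, add_left_comm] using this

-- Python's min as a recursion the proofs can take apart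
def pvMinFold (k : Int → Int) : Option Int → List Int → Option Int
  | acc, [] => acc
  | none, x :: t => pvMinFold k (some x) t
  | some m, x :: t => pvMinFold k (if k x < k m then some x else some m) t

lemma pvMin?_eq_pvMinFold (key : Int → Int) (xs : List Int) :
    PySem.List.min? xs key = pvMinFold key none xs := by
  simp only [PySem.List.min?]
  generalize (none : Option Int) = acc
  induction xs generalizing acc with
  | nil => cases acc <;> rfl
  | cons x t ih =>
    cases acc with
    | none => exact ih (some x)
    | some m =>
      by_cases h : key x < key m
      · simpa [pvMinFold, h] using ih (some x)
      · simpa [pvMinFold, h] using ih (some m)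

-- Python min with strict '<' keeps the earlier element on ties: an accumulator no
-- later element strictly beats is returned unchanged.
lemma pvMinFold_keep {k : Int → Int} {t : List Int} {m : Int}
    (h : ∀ j ∈ t, ¬ k j < k m) :
    pvMinFold k (some m) t = some m := by
  induction t with
  | nil => rfl
  | cons x t ih =>
    have hx : ¬ k x < k m := h x (by simp)
    simp only [pvMinFold, if_neg hx]
    exact ih (fun j hj => h j (by simp [hj]))

lemma pvMinFold_reach {k : Int → Int} {i : Int} :
    ∀ (t : List Int) (m : Int), t.Pairwise (· < ·) → i ∈ t →
    (∀ j ∈ t, k i < k j ∨ (k i = k j ∧ i ≤ j)) → k i < k m →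
    pvMinFold k (some m) t = some i := by
  intro t
  induction t with
  | nil => intro m _ hi; simp at hi
  | cons x t ih =>
    intro m hpw hi hall hm
    rcases List.pairwise_cons.mp hpw with ⟨hx, ht⟩
    by_cases hxi : x = i
    · subst hxi
      simp only [pvMinFold, if_pos hm]
      exact pvMinFold_keep (fun j hj => by
        rcases hall j (by simp [hj]) with h | h <;> omega)
    · have hit : i ∈ t := (List.mem_cons.mp hi).resolve_left (fun h => hxi h.symm)
      have hkx : k i < k x := by
        rcases hall x (by simp) with h | h
        · exact h
        · have := hx i hit; omega
      simp only [pvMinFold]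
      split
      · exact ih x ht hit (fun j hj => hall j (by simp [hj])) hkx
      · exact ih m ht hit (fun j hj => hall j (by simp [hj])) hm

lemma pvMinFold_first {k : Int → Int} {i : Int} {xs : List Int}
    (hpw : xs.Pairwise (· < ·)) (hi : i ∈ xs)
    (hall : ∀ j ∈ xs, k i < k j ∨ (k i = k j ∧ i ≤ j)) :
    pvMinFold k none xs = some i := by
  cases xs with
  | nil => simp at hi
  | cons x t =>
    rcases List.pairwise_cons.mp hpw with ⟨hx, ht⟩
    show pvMinFold k (some x) t = some i
    by_cases hxi : x = i
    · subst hxi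
      exact pvMinFold_keep (fun j hj => by
        rcases hall j (by simp [hj]) with h | h <;> omega)
    · have hit : i ∈ t := (List.mem_cons.mp hi).resolve_left (fun h => hxi h.symm)
      have hkx : k i < k x := by
        rcases hall x (by simp) with h | h
        · exact h
        · have := hx i hit; omega
      exact pvMinFold_reach t x ht hit (fun j hj => hall j (by simp [hj])) hkx

-- A's min(range(n_shards), key=…) returns the index the sorted priority list keeps at its head.
lemma pvMin_eq {sizes : List Int} {n_shards : Int} {s i : Int}
    (hn : 1 ≤ n_shards) (hlen : sizes.length = n_shards.toNat)
    (hi : 0 ≤ i) (hilen : i.toNat < sizes.length) (hs : sizes[i.toNat] = s)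
    (hmin : ∀ p ∈ pvPairs sizes 0, pvLexLe (s, i) p) :
    PySem.List.min? (PySem.List.pyRange 0 n_shards 1)
      (fun j => PySem.List.pyGetD sizes j 0) = some i := by
  have hnn : (0 : Int) ≤ n_shards := by omega
  have hrange : PySem.List.pyRange 0 n_shards 1
      = (List.range n_shards.toNat).map (fun k : Nat => (k : Int)) := by
    conv_lhs => rw [← Int.toNat_of_nonneg hnn]
    exact PySem.List.pyRange_zero_natCast _
  have hkeyi : PySem.List.pyGetD sizes i 0 = s := by
    rw [PySem.List.pyGetD_eq_getElem sizes 0 hi (by omega), hs]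
  rw [pvMin?_eq_pvMinFold, hrange]
  refine pvMinFold_first ?_ ?_ ?_
  · refine List.pairwise_map.mpr ?_
    exact List.pairwise_lt_range.imp (by intro a b h; exact_mod_cast h)
  · exact List.mem_map.mpr ⟨i.toNat, List.mem_range.mpr (by omega), Int.toNat_of_nonneg hi⟩
  · intro j hj
    obtain ⟨kk, hkk, rfl⟩ := List.mem_map.mp hj
    have hkklen : kk < sizes.length := by rw [hlen]; exact List.mem_range.mp hkk
    have hkey : PySem.List.pyGetD sizes (kk : Int) 0 = sizes[kk] := by
      rw [PySem.List.pyGetD_eq_getElem sizes 0 (by positivity) (by exact_mod_cast hkklen)]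
      simp
    have hp := hmin (sizes[kk], (kk : Int)) (by simpa using pvPairs_mem sizes 0 kk hkklen)
    unfold pvLexLe at hp
    simp only at hp ⊢
    rw [hkeyi, hkey]
    simpa using hp

-- updating entry i of sizes rearranges the pair multiset accordingly
lemma pvPairs_set_perm {sizes : List Int} {i : Int} (v : Int)
    (hi : 0 ≤ i) (hilen : i.toNat < sizes.length) :
    (pvPairs (sizes.set i.toNat v) 0).Perm
      ((v, i) :: (pvPairs sizes 0).erase (sizes[i.toNat], i)) := by
  have hlt : (sizes.take i.toNat).length = i.toNat := by
    simp [List.length_take]; omega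
  have hcast : ((sizes.take i.toNat).length : Int) = i := by
    rw [hlt]; exact Int.toNat_of_nonneg hi
  have h1 : pvPairs (sizes.set i.toNat v) 0
      = pvPairs (sizes.take i.toNat) 0 ++ (v, i) :: pvPairs (sizes.drop (i.toNat + 1)) (i + 1) := by
    rw [List.set_eq_take_cons_drop v hilen, pvPairs_append]
    simp only [pvPairs, zero_add, hcast]
  have h2 : pvPairs sizes 0
      = pvPairs (sizes.take i.toNat) 0 ++ (sizes[i.toNat], i) :: pvPairs (sizes.drop (i.toNat + 1)) (i + 1) := by
    conv_lhs => rw [← List.take_append_drop i.toNat sizes, ← List.getElem_cons_drop hilen]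
    rw [pvPairs_append]
    simp only [pvPairs, zero_add, hcast]
  have hnot : (sizes[i.toNat], i) ∉ pvPairs (sizes.take i.toNat) 0 := by
    intro hmem
    obtain ⟨k, hk, h2', _⟩ := mem_pvPairs hmem
    rw [hlt] at hk
    simp only [zero_add] at h2'
    omega
  rw [h1, h2, List.erase_append_right _ hnot, List.erase_cons_head]
  exact List.perm_middle

lemma length_pvPairs (l : List Int) (i : Int) : (pvPairs l i).length = l.length := by
  induction l generalizing i with
  | nil => rfl
  | cons x t ih => simp [pvPairs, ih]

-- the central loop invariant, by induction over the sorted component list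
lemma pvLoop (n_shards : Int) (w : List String → Int) (hn : 1 ≤ n_shards) :
    ∀ (comps : List (List String)) (shards : List (PySem.Set String))
      (sizes : List Int) (pq : List (Int × Int)),
    sizes.length = n_shards.toNat →
    pq.Perm (pvPairs sizes 0) →
    pq.Pairwise pvLexLe →
    (comps.foldl (fun st comp =>
      match PySem.List.min? (PySem.List.pyRange 0 n_shards 1) (fun i => PySem.List.pyGetD st.2 i 0) with
      | none => st
      | some smallest =>
        (PySem.List.pySetD st.1 smallest
           (PySem.Set.update (PySem.List.pyGetD st.1 smallest PySem.Set.empty) comp),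
         PySem.List.pySetD st.2 smallest
           (PySem.List.pyGetD st.2 smallest 0 + w comp)))
      (shards, sizes)).1
    = (comps.foldl (fun st comp =>
        match st.1 with
        | [] => st
        | (size, idx) :: rest =>
          (pvInsort (size + w comp, idx) rest,
           PySem.List.pySetD st.2 idx
             (PySem.Set.update (PySem.List.pyGetD st.2 idx PySem.Set.empty) comp)))
        (pq, shards)).2 := by
  intro comps
  induction comps with
  | nil => intro shards sizes pq _ _ _; rfl
  | cons comp comps ih =>
    intro shards sizes pq hlen hperm hpw
    cases pq with
    | nil =>
      exfalso
      have h := hperm.length_eq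
      rw [length_pvPairs] at h
      simp only [List.length_nil] at h
      omega
    | cons hd rest =>
      obtain ⟨s, i⟩ := hd
      have hmem : (s, i) ∈ pvPairs sizes 0 := hperm.mem_iff.mp (by simp)
      obtain ⟨k, hk, hi2, hs1⟩ := mem_pvPairs hmem
      simp only [zero_add] at hi2
      subst hi2
      have hi0 : (0 : Int) ≤ (k : Int) := by positivity
      have hitn : ((k : Int)).toNat = k := Int.toNat_natCast k
      have hilen : ((k : Int)).toNat < sizes.length := by rw [hitn]; exact hk
      have hmin : ∀ p ∈ pvPairs sizes 0, pvLexLe (s, (k : Int)) p := by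
        intro p hp
        rcases List.mem_cons.mp (hperm.mem_iff.mpr hp) with rfl | hp'
        · unfold pvLexLe; omega
        · exact (List.pairwise_cons.mp hpw).1 p hp'
      have hs2 : sizes[((k : Int)).toNat] = s := by
        simp only [Int.toNat_natCast]
        exact hs1.symm
      have hminA := pvMin_eq hn hlen hi0 hilen hs2 hmin
      have hget : PySem.List.pyGetD sizes (k : Int) 0 = s := by
        rw [PySem.List.pyGetD_eq_getElem sizes 0 hi0 (by omega)]
        exact hs2
      simp only [List.foldl_cons, hminA, hget]
      rw [PySem.List.pySetD_of_nonneg sizes (s + w comp) hi0]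
      refine ih _ _ _ ?_ ?_ ?_
      · simpa using hlen
      · refine (pvInsort_perm _ _).trans ?_
        have hrest : rest.Perm ((pvPairs sizes 0).erase (s, (k : Int))) := by
          have := hperm.erase (s, (k : Int))
          rwa [List.erase_cons_head] at this
        refine (List.Perm.cons _ hrest).trans ?_
        have hset := pvPairs_set_perm (sizes := sizes) (i := (k : Int)) (s + w comp) hi0 hilen
        rw [hs2] at hset
        exact hset.symm
      · exact pvInsort_pairwise (List.pairwise_cons.mp hpw).2

lemma pvInsertBy_map (w : List String → Int) (c : List String) (acc : List (List String)) :
    PySem.List.insertBy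
        (fun a b => decide ((fun p : Int × List String => p.1) b < (fun p : Int × List String => p.1) a))
        ((fun c => (w c, c)) c) (acc.map (fun c => (w c, c)))
      = (PySem.List.insertBy (fun a b => decide (w b < w a)) c acc).map (fun c => (w c, c)) := by
  induction acc with
  | nil => rfl
  | cons y ys ih =>
    simp only [List.map_cons, PySem.List.insertBy]
    by_cases h : w y < w c
    · simp [h]
    · simp [h, ih]

-- B sorts (weight, component) pairs by first component exactly as A sorts components by weight
lemma pvSorted_map (w : List String → Int) (xs : List (List String)) :
    PySem.List.sorted (xs.map (fun c => (w c, c))) (fun p => p.1) true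
      = (PySem.List.sorted xs w true).map (fun c => (w c, c)) := by
  rw [PySem.List.sorted_rev_eq_foldl_insertBy, PySem.List.sorted_rev_eq_foldl_insertBy,
    List.foldl_map]
  suffices h : ∀ acc : List (List String),
      xs.foldl (fun acc c => PySem.List.insertBy
          (fun a b => decide ((fun p : Int × List String => p.1) b < (fun p : Int × List String => p.1) a))
          ((fun c => (w c, c)) c) acc) (acc.map (fun c => (w c, c)))
      = (xs.foldl (fun acc c => PySem.List.insertBy (fun a b => decide (w b < w a)) c acc) acc).map
          (fun c => (w c, c)) by
    simpa using h []
  induction xs with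
  | nil => intro acc; rfl
  | cons c t ih =>
    intro acc
    simp only [List.foldl_cons]
    rw [pvInsertBy_map, ih]

-- ===== VERDICT (by name: the statement is the Claim_ definition above) =====
lemma pvPairs_replicate (n : Nat) :
    ∀ i : Int, pvPairs (List.replicate n 0) i
      = (List.range n).map (fun k : Nat => ((0 : Int), i + k)) := by
  induction n with
  | zero => intro i; rfl
  | succ n ih =>
    intro i
    rw [List.replicate_succ, List.range_succ_eq_map]
    simp only [pvPairs, List.map_cons, ih (i + 1), List.map_map, List.cons.injEq]
    refine ⟨by simp, List.map_congr_left ?_⟩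
    intro a _
    simp only [Function.comp_apply]
    congr 1
    push_cast
    ring

-- ===== VERDICT (by name: the statement is the Claim_ definition above) =====
theorem greedy_partition_py_spec : Claim_equal_greedy_partition_py := by
  intro components sym_counts n_shards _ hpre
  unfold Spec_greedy_partition_py
  rcases hpre with rfl | hn
  · rfl
  · have hnn : (0 : Int) ≤ n_shards := by omega
    have hrange : PySem.List.pyRange 0 n_shards 1
        = (List.range n_shards.toNat).map (fun k : Nat => (k : Int)) := by
      conv_lhs => rw [← Int.toNat_of_nonneg hnn]
      exact PySem.List.pyRange_zero_natCast _
    simp only [greedy_partition_py, greedy_partition_py_alt]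
    rw [pvSorted_map (fun c => pvWeight (PySem.Dict.ofList sym_counts) c) components,
      List.foldl_map]
    refine pvLoop n_shards (fun c => pvWeight (PySem.Dict.ofList sym_counts) c) hn
      (PySem.List.sorted components (fun c => pvWeight (PySem.Dict.ofList sym_counts) c) true)
      _ _ _ ?_ ?_ ?_
    · simp
    · rw [hrange, pvPairs_replicate]
      refine List.Perm.of_eq ?_
      simp [Function.comp_def]
    · rw [hrange]
      simp only [List.pairwise_map]
      refine List.pairwise_lt_range.imp ?_
      intro a b h
      unfold pvLexLe
      right
      exact ⟨rfl, by simp; exact_mod_cast Nat.le_of_lt h⟩
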